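-- pv_equiv track=rewrite | github.com/Deepomatic/dmake | dmake/core.py | order_dependencies
-- ===== SOURCE A (Python) =====
-- def order_dependencies(dependencies, leaves):
--     ordered_build_files = {}
--     def sub_order(key, depth):
--         if key in ordered_build_files and depth >= ordered_build_files[key]:
--             return
--         ordered_build_files[key] = depth
--         if key in dependencies:
--             for f in dependencies[key]:
--                 sub_order(f, depth - 1)
--
--     for file, depth in leaves:
--         sub_order(file, depth)
--     return ordered_build_files
-- ===== SOURCE B (Python) =====
-- def order_dependencies(dependencies, leaves):
--     # Iterative re-implementation: the recursive closure of A is replaced by an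
--     # explicit LIFO stack of (node, depth) frames; no recursion limit.
--     ordered = {}
--     for file, depth in leaves:
--         stack = [(file, depth)]
--         while stack:
--             key, d = stack.pop()
--             if key in ordered and d >= ordered[key]:
--                 continue
--             ordered[key] = d
--             for f in reversed(dependencies.get(key, ())):
--                 stack.append((f, d - 1))
--     return ordered
-- ===== Notes on version B (the rewrite author's own statement) =====
-- stated objective: alternative
-- what changed: A's recursive inner closure sub_order is replaced by an iterative traversal with an explicit LIFO stack of (node, depth) frames, removing both the nested function and Python's recursion-depth limit; same depth-propagation values and insertion order.
import Mathlib
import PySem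

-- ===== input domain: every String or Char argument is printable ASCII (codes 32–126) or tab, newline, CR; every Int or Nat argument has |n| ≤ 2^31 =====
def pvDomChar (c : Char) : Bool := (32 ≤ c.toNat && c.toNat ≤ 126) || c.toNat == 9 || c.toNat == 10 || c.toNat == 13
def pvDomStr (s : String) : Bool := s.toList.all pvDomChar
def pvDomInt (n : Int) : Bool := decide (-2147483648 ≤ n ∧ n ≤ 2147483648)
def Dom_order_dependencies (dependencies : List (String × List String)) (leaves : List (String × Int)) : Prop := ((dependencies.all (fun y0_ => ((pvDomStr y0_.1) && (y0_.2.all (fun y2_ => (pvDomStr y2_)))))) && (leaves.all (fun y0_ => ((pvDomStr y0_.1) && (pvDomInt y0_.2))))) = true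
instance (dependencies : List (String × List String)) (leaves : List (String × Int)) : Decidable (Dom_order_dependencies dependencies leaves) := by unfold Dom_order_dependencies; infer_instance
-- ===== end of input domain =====

-- B replaces A's recursive closure by an explicit-stack iteration (same values and
-- insertion order, no recursion limit); objective: alternative decomposition.

-- Shared totalization fuel (a guard only: large enough for every input Pre_ admits;
-- both ports thread it one unit per processed frame/call, so it never changes a result
-- that the Python computes).
def pvFuel (dependencies : List (String × List String)) (leaves : List (String × Int)) : Nat :=
  (leaves.length + 1) * (dependencies.foldl (fun a p => a + p.2.length + 1) 2) ^ (dependencies.length + 2)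

-- ===== PORT A =====
-- literal transliteration of A: recursive sub_order over (key, depth), threading the
-- mutable dict ordered_build_files and the fuel (1 unit per sub_order call).
mutual
def subOrderA (dependencies : List (String × List String)) :
    (n : Nat) → String → Int → PySem.Dict String Int →
      PySem.Dict String Int × {m : Nat // m ≤ n}
  | 0, _, _, st => (st, ⟨0, Nat.le_refl 0⟩)
  | n+1, key, depth, st =>
    -- "if key in ordered_build_files and depth >= ordered_build_files[key]: return"
    let hit : Bool := match st.get? key with | some v => decide (v ≤ depth) | none => false
    if hit then
      (st, ⟨n, Nat.le_succ n⟩)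
    else
      let st' := st.insert key depth
      match (PySem.Dict.mk dependencies).get? key with
      | some fs =>
          let r := subOrderA_list dependencies n fs (depth - 1) st'
          (r.1, ⟨r.2.1, Nat.le_succ_of_le r.2.2⟩)
      | none => (st', ⟨n, Nat.le_succ n⟩)
  termination_by n _ _ _ => (n, 0)
  decreasing_by
    exact Prod.Lex.left _ _ (Nat.lt_succ_self n)

-- "for f in dependencies[key]: sub_order(f, depth - 1)"
def subOrderA_list (dependencies : List (String × List String)) :
    (n : Nat) → List String → Int → PySem.Dict String Int →
      PySem.Dict String Int × {m : Nat // m ≤ n}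
  | n, [], _, st => (st, ⟨n, Nat.le_refl n⟩)
  | n, f :: fs, d, st =>
      let r := subOrderA dependencies n f d st
      let r2 := subOrderA_list dependencies r.2.1 fs d r.1
      (r2.1, ⟨r2.2.1, Nat.le_trans r2.2.2 r.2.2⟩)
  termination_by n fs _ _ => (n, fs.length + 1)
  decreasing_by
    all_goals simp_wf
    · exact Prod.Lex.right _ (Nat.succ_pos _)
    · rcases Nat.lt_or_ge r.2.1 n with h' | h'
      · exact Prod.Lex.left _ _ h'
      · have he : r.2.1 = n := Nat.le_antisymm r.2.2 h'
        rw [he]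
        exact Prod.Lex.right _ (Nat.lt_succ_self _)
end

def order_dependencies (dependencies : List (String × List String)) (leaves : List (String × Int)) : List (String × Int) :=
  -- "for file, depth in leaves: sub_order(file, depth); return ordered_build_files"
  (leaves.foldl
    (fun (acc : PySem.Dict String Int × Nat) fd =>
      let r := subOrderA dependencies acc.2 fd.1 fd.2 acc.1
      (r.1, r.2.1))
    ((PySem.Dict.empty : PySem.Dict String Int), pvFuel dependencies leaves)).1.items

-- ===== PORT B =====
-- literal transliteration of B's while-loop; the Python stack's top (list end) is the
-- Lean list head, so "for f in reversed(deps): stack.append((f, d-1))" prepends the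
-- children in their original order.  1 fuel unit per popped frame.
def loopB (dependencies : List (String × List String)) :
    Nat → List (String × Int) → PySem.Dict String Int → PySem.Dict String Int × Nat
  | n, [], st => (st, n)
  | 0, _ :: _, st => (st, 0)
  | n+1, (key, d) :: stack, st =>
    let hit : Bool := match st.get? key with | some v => decide (v ≤ d) | none => false
    if hit then
      loopB dependencies n stack st
    else
      loopB dependencies n
        ((((PySem.Dict.mk dependencies).get? key).getD []).map (fun f => (f, d - 1)) ++ stack)
        (st.insert key d)

def order_dependencies_alt (dependencies : List (String × List String)) (leaves : List (String × Int)) : List (String × Int) :=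
  (leaves.foldl
    (fun (acc : PySem.Dict String Int × Nat) fd =>
      loopB dependencies acc.2 [(fd.1, fd.2)] acc.1)
    ((PySem.Dict.empty : PySem.Dict String Int), pvFuel dependencies leaves)).1.items

-- ===== PRECONDITION & SPEC =====
-- one breadth step along the dependency edges
def pvStep (dependencies : List (String × List String)) (frontier : List String) : List String :=
  (frontier.flatMap (fun u => ((PySem.Dict.mk dependencies).get? u).getD [])).dedup

-- Pre_ excludes exactly the inputs on which the Python A never returns (it recurses
-- forever on any dependency cycle reachable from a leaf file): it requires that no
-- walk of |dependencies| + 1 edges starts at a leaf file, which holds iff no cycle is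
-- reachable from the leaves.
def Pre_order_dependencies (dependencies : List (String × List String)) (leaves : List (String × Int)) : Prop :=
  (pvStep dependencies)^[dependencies.length + 1] ((leaves.map Prod.fst).dedup) = []
instance (dependencies : List (String × List String)) (leaves : List (String × Int)) : Decidable (Pre_order_dependencies dependencies leaves) := by unfold Pre_order_dependencies; infer_instance

def pvWitness_order_dependencies : (List (String × List String)) × (List (String × Int)) :=
  ([("a", ["b", "c"]), ("b", ["c"])], [("a", 5), ("c", 2)])

def Spec_order_dependencies (dependencies : List (String × List String)) (leaves : List (String × Int)) (out : List (String × Int)) : Prop := out = order_dependencies_alt dependencies leaves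
instance (dependencies : List (String × List String)) (leaves : List (String × Int)) (out : List (String × Int)) : Decidable (Spec_order_dependencies dependencies leaves out) := by unfold Spec_order_dependencies; infer_instance

-- ===== CLAIM (what is proved, stated in full; the proofs are below) =====
def Claim_equal_order_dependencies : Prop := ∀ (dependencies : List (String × List String)) (leaves : List (String × Int)), Dom_order_dependencies dependencies leaves → Pre_order_dependencies dependencies leaves → Spec_order_dependencies dependencies leaves (order_dependencies dependencies leaves)

-- ===== LEMMAS AND PROOFS =====

theorem loopB_zero (dependencies : List (String × List String)) (stack : List (String × Int))
    (st : PySem.Dict String Int) : loopB dependencies 0 stack st = (st, 0) := by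
  cases stack <;> simp [loopB]

-- The stack machine pops frames in exactly the order A makes its recursive calls,
-- consuming the same fuel: running one pending frame equals one sub_order call.
mutual
theorem loopB_eq_subOrderA (dependencies : List (String × List String)) :
    ∀ (n : Nat) (key : String) (d : Int) (st : PySem.Dict String Int) (rest : List (String × Int)),
      loopB dependencies n ((key, d) :: rest) st =
        (let r := subOrderA dependencies n key d st; loopB dependencies r.2.1 rest r.1)
  | 0, key, d, st, rest => by
      simp [subOrderA, loopB_zero]
  | n+1, key, d, st, rest => by
      simp only [loopB, subOrderA]
      cases hg : st.get? key with
      | some v =>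
          by_cases hv : v ≤ d
          · simp [hv]
          · simp only [decide_eq_true_eq, hv, if_false]
            cases hd : (PySem.Dict.mk dependencies).get? key with
            | none => simp
            | some fs =>
                simp only [Option.getD_some]
                exact loopB_eq_subOrderA_list dependencies n fs (d - 1) (st.insert key d) rest
      | none =>
          simp only [Bool.false_eq_true, reduceIte]
          cases hd : (PySem.Dict.mk dependencies).get? key with
          | none => simp
          | some fs =>
              simp only [Option.getD_some]
              exact loopB_eq_subOrderA_list dependencies n fs (d - 1) (st.insert key d) rest
  termination_by n _ _ _ _ => (n, 0)
  decreasing_by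
    all_goals exact Prod.Lex.left _ _ (Nat.lt_succ_self n)

theorem loopB_eq_subOrderA_list (dependencies : List (String × List String)) :
    ∀ (n : Nat) (fs : List String) (d : Int) (st : PySem.Dict String Int) (rest : List (String × Int)),
      loopB dependencies n (fs.map (fun f => (f, d)) ++ rest) st =
        (let r := subOrderA_list dependencies n fs d st; loopB dependencies r.2.1 rest r.1)
  | n, [], d, st, rest => by
      simp [subOrderA_list]
  | n, f :: fs, d, st, rest => by
      simp only [List.map_cons, List.cons_append]
      rw [loopB_eq_subOrderA dependencies n f d st (fs.map (fun f => (f, d)) ++ rest)]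
      simp only []
      rw [loopB_eq_subOrderA_list dependencies (subOrderA dependencies n f d st).2.1 fs d
            (subOrderA dependencies n f d st).1 rest]
      simp [subOrderA_list]
  termination_by n fs _ _ _ => (n, fs.length + 1)
  decreasing_by
    · exact Prod.Lex.right _ (Nat.succ_pos _)
    · rcases Nat.lt_or_ge (subOrderA dependencies n f d st).2.1 n with h' | h'
      · exact Prod.Lex.left _ _ h'
      · have he : (subOrderA dependencies n f d st).2.1 = n :=
          Nat.le_antisymm (subOrderA dependencies n f d st).2.2 h'
        rw [he]
        exact Prod.Lex.right _ (Nat.lt_succ_self _)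
end

theorem fold_step_eq (dependencies : List (String × List String))
    (acc : PySem.Dict String Int × Nat) (fd : String × Int) :
    loopB dependencies acc.2 [(fd.1, fd.2)] acc.1 =
      (let r := subOrderA dependencies acc.2 fd.1 fd.2 acc.1; (r.1, r.2.1)) := by
  rw [loopB_eq_subOrderA dependencies acc.2 fd.1 fd.2 acc.1 []]
  cases hn : (subOrderA dependencies acc.2 fd.1 fd.2 acc.1) with
  | mk st m => simp [loopB]

-- ===== VERDICT (by name: the statement is the Claim_ definition above) =====
theorem order_dependencies_spec : Claim_equal_order_dependencies := by
  intro dependencies leaves _ _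
  unfold Spec_order_dependencies order_dependencies order_dependencies_alt
  have hf : (fun (acc : PySem.Dict String Int × Nat) (fd : String × Int) =>
        let r := subOrderA dependencies acc.2 fd.1 fd.2 acc.1; (r.1, r.2.1))
      = (fun (acc : PySem.Dict String Int × Nat) (fd : String × Int) =>
        loopB dependencies acc.2 [(fd.1, fd.2)] acc.1) := by
    funext acc fd
    exact (fold_step_eq dependencies acc fd).symm
  rw [hf]
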